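-- pv_equiv track=rewrite | github.com/horitaku/md2html | sub_func.py | conv_code1
-- ===== SOURCE A (Python) =====
-- def conv_code1(listxs):
--     # ```で囲まれたコードを1組分だけ変換する
--     # <pre> </pre> も追加されるので注意
--     s1=-1
--     s2=-1
--     rt_code=False
--     for i,list0 in enumerate(listxs):
--         if list0.startswith('```'):
--             if s1 < 0 :
--                 s1=i
--             else:
--                 s2=i
--                 rt_code=True
--                 break
--     if rt_code:
--         listxs[s1]='<div class="highlighter-rouge"><div class="highlight"><pre class="highlight"><code>'
--         listxs[s2]='</code></pre></div></div>'
--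
--     return listxs, rt_code
-- ===== SOURCE B (Python) =====
-- def conv_code1(listxs):
--     # Rebuild the list in one pass, replacing fence lines as they are met
--     # (up to two, counted), then commit the rebuilt list only if two fences
--     # were found; mutates listxs in place like A (via slice assignment).
--     out = []
--     fcount = 0
--     for x in listxs:
--         if fcount < 2 and x.startswith('```'):
--             out.append('<div class="highlighter-rouge"><div class="highlight"><pre class="highlight"><code>'
--                        if fcount == 0 else '</code></pre></div></div>')
--             fcount += 1
--         else:
--             out.append(x)
--     if fcount == 2:
--         listxs[:] = out
--         return listxs, True
--     return listxs, False
-- ===== Notes on version B (the rewrite author's own statement) =====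
-- stated objective: alternative
-- what changed: A scans for the indices of the first two fence lines and then overwrites those two positions in place; B never computes indices: it rebuilds the whole list in a single counted pass, substituting the HTML tags for the first two fence lines as it copies, and commits the rebuilt list only if the fence counter reached two.
import Mathlib
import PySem

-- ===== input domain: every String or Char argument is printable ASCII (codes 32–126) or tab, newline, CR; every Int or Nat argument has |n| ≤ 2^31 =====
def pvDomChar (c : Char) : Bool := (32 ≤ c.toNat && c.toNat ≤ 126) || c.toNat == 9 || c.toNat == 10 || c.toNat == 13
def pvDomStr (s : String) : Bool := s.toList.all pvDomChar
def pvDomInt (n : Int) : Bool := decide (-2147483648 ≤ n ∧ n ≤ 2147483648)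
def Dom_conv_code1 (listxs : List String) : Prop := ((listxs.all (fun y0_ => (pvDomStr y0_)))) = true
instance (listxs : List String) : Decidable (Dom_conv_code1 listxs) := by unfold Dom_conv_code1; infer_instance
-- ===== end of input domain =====

-- B replaces A's index-finding state machine (locate s1/s2, then overwrite those two
-- positions) by a single counted rebuild pass that substitutes the tags while copying and
-- commits the new list only if two fences were counted; same cost, different decomposition.
-- Both Pythons mutate listxs in place; the equivalence proved is about the returned value.


-- the two replacement HTML lines
def pvOpenTag : String := "<div class=\"highlighter-rouge\"><div class=\"highlight\"><pre class=\"highlight\"><code>"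
def pvCloseTag : String := "</code></pre></div></div>"

-- ===== PORT A =====
-- A's for-loop over enumerate(listxs) with state s1, s2 and an early break (the break
-- returns (s1, i, true) directly); rt_code is false exactly when the loop runs out.
def convALoop : List (Int × String) → Int → Int → (Int × Int × Bool)
  | [], s1, s2 => (s1, s2, false)
  | (i, x) :: rest, s1, s2 =>
    if PySem.Str.startswith x "```" then
      if s1 < 0 then convALoop rest i s2
      else (s1, i, true)
    else convALoop rest s1 s2

def conv_code1 (listxs : List String) : List String × Bool :=
  match convALoop (PySem.List.enumerate listxs 0) (-1) (-1) with
  | (s1, s2, rt) =>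
    if rt then
      -- listxs[s1]=… ; listxs[s2]=… : both indices are valid here, pySetD is exact
      (PySem.List.pySetD (PySem.List.pySetD listxs s1 pvOpenTag) s2 pvCloseTag, true)
    else (listxs, false)

-- ===== PORT B =====
-- B's loop body: out.append(tag or x), fcount bookkeeping; the for-loop is a foldl over
-- the state (out, fcount); finally the rebuilt list is committed only if fcount == 2.
def convBStep (acc : List String × Nat) (x : String) : List String × Nat :=
  if acc.2 < 2 ∧ PySem.Str.startswith x "```" then
    (acc.1 ++ [if acc.2 = 0 then pvOpenTag else pvCloseTag], acc.2 + 1)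
  else (acc.1 ++ [x], acc.2)

def conv_code1_alt (listxs : List String) : List String × Bool :=
  let r := listxs.foldl convBStep ([], 0)
  if r.2 = 2 then (r.1, true) else (listxs, false)

-- ===== PRECONDITION & SPEC =====
def Spec_conv_code1 (listxs : List String) (out : List String × Bool) : Prop := out = conv_code1_alt listxs
instance (listxs : List String) (out : List String × Bool) : Decidable (Spec_conv_code1 listxs out) := by unfold Spec_conv_code1; infer_instance

-- ===== CLAIM (what is proved, stated in full; the proofs are below) =====
def Claim_equal_conv_code1 : Prop := ∀ (listxs : List String), Dom_conv_code1 listxs → Spec_conv_code1 listxs (conv_code1 listxs)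

-- ===== LEMMAS AND PROOFS =====

-- Phase 2 of A's loop (s1 already found, s1 ≥ 0): it returns the first later match.
theorem convALoop_phase2 (l : List String) (k : Nat) (s1 : Int) (hs1 : 0 ≤ s1) :
    convALoop (PySem.List.enumerate l (k : Int)) s1 (-1) =
      match l.findIdx? (fun x => PySem.Str.startswith x "```") with
      | none => (s1, -1, false)
      | some j => (s1, ((k + j : Nat) : Int), true) := by
  induction l generalizing k with
  | nil => simp only [PySem.List.enumerate_nil, convALoop, List.findIdx?_nil]
  | cons x xs ih =>
    rw [PySem.List.enumerate_cons, convALoop, List.findIdx?_cons]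
    by_cases hx : PySem.Str.startswith x "```"
    · simp only [hx, if_pos, not_lt.mpr hs1, if_false, Nat.add_zero]
    · have hk : ((k : Int) + 1) = ((k + 1 : Nat) : Int) := by push_cast; ring
      simp only [hx, if_false, Bool.false_eq_true, hk, ih]
      cases h : xs.findIdx? (fun x => PySem.Str.startswith x "```") with
      | none => simp only [Option.map_none]
      | some j =>
        simp only [Option.map_some, Prod.mk.injEq, true_and, and_true]
        omega

-- A's whole loop in terms of findIdx? of the list and of the suffix after the first hit.
theorem convALoop_spec (l : List String) (k : Nat) :
    convALoop (PySem.List.enumerate l (k : Int)) (-1) (-1) =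
      match l.findIdx? (fun x => PySem.Str.startswith x "```") with
      | none => (-1, -1, false)
      | some i =>
        match (l.drop (i + 1)).findIdx? (fun x => PySem.Str.startswith x "```") with
        | none => (((k + i : Nat) : Int), -1, false)
        | some j => (((k + i : Nat) : Int), ((k + i + 1 + j : Nat) : Int), true) := by
  induction l generalizing k with
  | nil => simp only [PySem.List.enumerate_nil, convALoop, List.findIdx?_nil]
  | cons x xs ih =>
    rw [PySem.List.enumerate_cons, convALoop, List.findIdx?_cons]
    by_cases hx : PySem.Str.startswith x "```"
    · have hk : ((k : Int) + 1) = ((k + 1 : Nat) : Int) := by push_cast; ring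
      rw [if_pos hx, if_pos (by norm_num : (-1 : Int) < 0), hk,
        convALoop_phase2 xs (k + 1) (k : Int) (by positivity)]
      simp only [hx, if_pos, List.drop_succ_cons, List.drop_zero, Nat.add_zero]
    · have hk : ((k : Int) + 1) = ((k + 1 : Nat) : Int) := by push_cast; ring
      rw [if_neg (by simp only [hx]; exact Bool.false_ne_true), hk, ih]
      simp only [hx, if_false, Bool.false_eq_true, List.drop_succ_cons]
      cases h : xs.findIdx? (fun x => PySem.Str.startswith x "```") with
      | none => simp only [Option.map_none]
      | some i =>
        simp only [Option.map_some]
        cases h2 : (xs.drop (i + 1)).findIdx? (fun x => PySem.Str.startswith x "```") with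
        | none => simp only [Prod.mk.injEq, and_true]; omega
        | some j =>
          simp only [Prod.mk.injEq, and_true]
          exact ⟨by omega, by omega⟩

-- B's fold after both replacements (fcount = 2): it just copies the rest.
theorem convBfold2 (l out : List String) :
    l.foldl convBStep (out, 2) = (out ++ l, 2) := by
  induction l generalizing out with
  | nil => simp
  | cons x xs ih =>
    simp only [List.foldl_cons, convBStep]
    rw [if_neg (by simp), ih]
    simp

-- B's fold after the first replacement (fcount = 1): replaces the next fence, if any.
theorem convBfold1 (l out : List String) :
    l.foldl convBStep (out, 1) =
      match l.findIdx? (fun x => PySem.Str.startswith x "```") with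
      | none => (out ++ l, 1)
      | some j => (out ++ l.take j ++ [pvCloseTag] ++ l.drop (j + 1), 2) := by
  induction l generalizing out with
  | nil => simp
  | cons x xs ih =>
    simp only [List.foldl_cons, convBStep, List.findIdx?_cons]
    by_cases hx : PySem.Str.startswith x "```"
    · have hxc : PySem.Chars.startswith x.toList ['`', '`', '`'] = true := hx
      rw [if_pos ⟨by omega, hx⟩]
      show List.foldl convBStep (out ++ [pvCloseTag], 2) xs = _
      rw [convBfold2]
      simp [hxc]

    · have hxc : PySem.Chars.startswith x.toList ['`', '`', '`'] = false := by simpa using hx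
      rw [if_neg (by simp [hxc]), ih]
      cases h : xs.findIdx? (fun x => PySem.Str.startswith x "```") with
      | none => simp [hxc]
      | some j => simp [hxc]

-- B's fold from scratch (fcount = 0): the full two-stage characterisation.
theorem convBfold0 (l : List String) :
    l.foldl convBStep ([], 0) =
      match l.findIdx? (fun x => PySem.Str.startswith x "```") with
      | none => (l, 0)
      | some i =>
        match (l.drop (i + 1)).findIdx? (fun x => PySem.Str.startswith x "```") with
        | none => (l.take i ++ [pvOpenTag] ++ l.drop (i + 1), 1)
        | some j => (l.take i ++ [pvOpenTag] ++ (l.drop (i + 1)).take j ++ [pvCloseTag]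
                     ++ (l.drop (i + 1)).drop (j + 1), 2) := by
  have gen : ∀ (l out : List String), l.foldl convBStep (out, 0) =
      match l.findIdx? (fun x => PySem.Str.startswith x "```") with
      | none => (out ++ l, 0)
      | some i =>
        match (l.drop (i + 1)).findIdx? (fun x => PySem.Str.startswith x "```") with
        | none => (out ++ l.take i ++ [pvOpenTag] ++ l.drop (i + 1), 1)
        | some j => (out ++ l.take i ++ [pvOpenTag] ++ (l.drop (i + 1)).take j ++ [pvCloseTag]
                     ++ (l.drop (i + 1)).drop (j + 1), 2) := by
    intro l
    induction l with
    | nil => simp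
    | cons x xs ih =>
      intro out
      simp only [List.foldl_cons, convBStep, List.findIdx?_cons]
      by_cases hx : PySem.Str.startswith x "```"
      · have hxc : PySem.Chars.startswith x.toList ['`', '`', '`'] = true := hx
        rw [if_pos ⟨by omega, hx⟩]
        show List.foldl convBStep (out ++ [pvOpenTag], 1) xs = _
        rw [convBfold1]
        cases h : xs.findIdx? (fun x => PySem.Chars.startswith x.toList ['`', '`', '`']) with
        | none => simp [hxc, h]
        | some j => simp [hxc, h]
      · have hxc : PySem.Chars.startswith x.toList ['`', '`', '`'] = false := by simpa using hx
        rw [if_neg (by simp [hxc]), ih]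
        cases h : xs.findIdx? (fun x => PySem.Str.startswith x "```") with
        | none => simp [hxc]
        | some i =>
          simp only [Option.map_some, List.drop_succ_cons]
          cases h2 : (xs.drop (i + 1)).findIdx? (fun x => PySem.Chars.startswith x.toList ['`', '`', '`']) with
          | none => simp [hxc, h2]
          | some j => simp [hxc, h2]
  simpa using gen l []

-- a double List.set at i < i+1+j < length equals the take/drop decomposition B builds
theorem set_set_eq_take_drop (l : List String) (i j : Nat)
    (hi : i < l.length) (hj : i + 1 + j < l.length) :
    (l.set i pvOpenTag).set (i + 1 + j) pvCloseTag =
      l.take i ++ [pvOpenTag] ++ (l.drop (i + 1)).take j ++ [pvCloseTag]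
        ++ (l.drop (i + 1)).drop (j + 1) := by
  have hti : (l.take i).length = i := by simp; omega
  have e1 : l.set i pvOpenTag = l.take i ++ pvOpenTag :: l.drop (i + 1) := by
    rw [List.set_eq_take_append_cons_drop, if_pos hi]
  have hlen : (l.take i ++ pvOpenTag :: l.drop (i + 1)).length = l.length := by
    simp; omega
  rw [e1, List.set_eq_take_append_cons_drop, if_pos (by rw [hlen]; exact hj)]
  have e_take : (l.take i ++ pvOpenTag :: l.drop (i + 1)).take (i + 1 + j)
      = l.take i ++ pvOpenTag :: (l.drop (i + 1)).take j := by
    rw [List.take_append, hti]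
    have h1 : (l.take i).take (i + 1 + j) = l.take i := by
      rw [List.take_take]
      congr 1
      omega
    have h2 : i + 1 + j - i = j + 1 := by omega
    rw [h1, h2, List.take_succ_cons]
  have e_drop : (l.take i ++ pvOpenTag :: l.drop (i + 1)).drop (i + 1 + j + 1)
      = (l.drop (i + 1)).drop (j + 1) := by
    rw [List.drop_append, hti]
    have h1 : (l.take i).drop (i + 1 + j + 1) = [] := by
      apply List.drop_eq_nil_of_le
      omega
    have h2 : i + 1 + j + 1 - i = j + 1 + 1 := by omega
    rw [h1, h2, List.drop_succ_cons, List.nil_append]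
  rw [e_take, e_drop]
  simp

-- ===== VERDICT (by name: the statement is the Claim_ definition above) =====
theorem conv_code1_spec : Claim_equal_conv_code1 := by
  intro listxs _
  unfold Spec_conv_code1 conv_code1 conv_code1_alt
  have h0 : ((0 : Int)) = ((0 : Nat) : Int) := rfl
  rw [h0, convALoop_spec listxs 0, convBfold0 listxs]
  cases h : listxs.findIdx? (fun x => PySem.Str.startswith x "```") with
  | none => simp
  | some i =>
    have hi : i < listxs.length := (List.findIdx?_eq_some_iff_getElem.mp h).1
    simp only [Nat.zero_add]
    cases h2 : (listxs.drop (i + 1)).findIdx? (fun x => PySem.Str.startswith x "```") with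
    | none => simp
    | some j =>
      have hj' : j < (listxs.drop (i + 1)).length := (List.findIdx?_eq_some_iff_getElem.mp h2).1
      have hj : i + 1 + j < listxs.length := by
        simp only [List.length_drop] at hj'; omega
      simp only [if_pos, PySem.List.pySetD_natCast]
      rw [set_set_eq_take_drop listxs i j hi hj]
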